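-- pv_equiv track=rewrite | github.com/jevonsgong/GraphIsomorphism | utils.py | node_invariant
-- ===== SOURCE A (Python) =====
-- from collections import deque, defaultdict, OrderedDict, Counter
--
-- fuzz1 = [int("37541", 8), int("61532", 8), int("5257", 8), int("26416", 8)]
--
-- def FUZZ1(x):
--     """Implements FUZZ1(x) = x XOR fuzz1[x & 3]."""
--     return x ^ fuzz1[x & 3]
--
-- def MASHCOMM(l, i):
--     """
--     Commutative mix function.
--     In Traces, defined as:  MASHCOMM(l, i) = (l + FUZZ1(i)).
--     """
--     return l + FUZZ1(i)
--
-- def CLEANUP(l):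
--     """
--     Cleanup function: in Traces defined as CLEANUP(l) = ((l) % 0x7FFF).
--     """
--     return l % 0x7FFF
--
-- def node_invariant(G, pi, sequence):
--     """
--     Computes an invariant value in the style of Traces.
--
--     The invariant is built only from the partition (coloring) and the branch (individualization sequence).
--
--     In Traces.c, the candidate structure accumulates a "singcode" by applying MASHCOMM
--     for each singleton cell. Then the branch information is mixed in—using
--     the color values.
--
--     The final value is then cleaned-up (taken modulo 0x7FFF).
--     """
--     inv = 0
--     n = len(pi)
--     counts = Counter(pi)
--
--     # Mix in every vertex that forms a singleton cell
--     for v in range(n):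
--         if counts[pi[v]] == 1:
--             inv = MASHCOMM(inv, v)
--
--     # Mix in the sequence information.
--     for v in sequence:
--         color_value = pi[v]
--         inv = MASHCOMM(inv, color_value)
--
--     return CLEANUP(inv)
-- ===== SOURCE B (Python) =====
-- FUZZ1_TABLE = [int("37541", 8), int("61532", 8), int("5257", 8), int("26416", 8)]
--
--
-- def node_invariant(G, pi, sequence):
--     # Sort the vertices by color; equal colors become contiguous runs, and a
--     # vertex is a singleton cell exactly when its run has length 1.  The mix
--     # is a commutative sum, so visiting singletons in color order is exact.
--     order = sorted(range(len(pi)), key=lambda v: pi[v])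
--     inv = 0
--     i, n = 0, len(order)
--     while i < n:
--         j = i + 1
--         while j < n and pi[order[j]] == pi[order[i]]:
--             j += 1
--         if j == i + 1:
--             v = order[i]
--             inv += v ^ FUZZ1_TABLE[v & 3]
--         i = j
--     for v in sequence:
--         c = pi[v]
--         inv += c ^ FUZZ1_TABLE[c & 3]
--     return inv % 0x7FFF
-- ===== Notes on version B (the rewrite author's own statement) =====
-- stated objective: alternative
-- what changed: B replaces the Counter-based membership counting by sort-then-scan: vertices are sorted by color so equal colors form contiguous runs, and the run scan mixes in exactly the length-1 runs; correct because the mix is a commutative sum.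
import Mathlib
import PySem

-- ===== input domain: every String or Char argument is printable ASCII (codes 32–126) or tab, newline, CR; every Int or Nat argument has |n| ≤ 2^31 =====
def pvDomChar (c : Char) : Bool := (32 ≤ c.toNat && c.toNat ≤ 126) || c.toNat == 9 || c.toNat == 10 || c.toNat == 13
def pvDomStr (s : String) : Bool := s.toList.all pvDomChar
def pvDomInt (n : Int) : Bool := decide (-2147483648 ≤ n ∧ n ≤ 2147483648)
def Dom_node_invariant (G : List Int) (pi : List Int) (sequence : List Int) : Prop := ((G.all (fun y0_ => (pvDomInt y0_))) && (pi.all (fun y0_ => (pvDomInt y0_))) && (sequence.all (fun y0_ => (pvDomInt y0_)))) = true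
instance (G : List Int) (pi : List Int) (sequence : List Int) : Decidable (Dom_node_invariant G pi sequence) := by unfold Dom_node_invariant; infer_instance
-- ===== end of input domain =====

-- B replaces the Counter-based singleton test by sort-then-scan: vertices sorted by
-- color, and a run of length 1 is a singleton cell (objective: alternative; the mix
-- is a commutative sum, so the changed visiting order is exact).

-- ===== PORT A =====
def fuzz1 : List Int := [0o37541, 0o61532, 0o5257, 0o26416]

-- index fuzz1[x & 3] is always in range (band x 3 ∈ [0,3]), so the default 0 is never used
def FUZZ1 (x : Int) : Int := PySem.Int.bxor x (PySem.List.pyGetD fuzz1 (PySem.Int.band x 3) 0)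

def MASHCOMM (l : Int) (i : Int) : Int := l + FUZZ1 i

def CLEANUP (l : Int) : Int := PySem.Int.mod l 0x7FFF

def node_invariant (G : List Int) (pi : List Int) (sequence : List Int) : Int :=
  let inv : Int := 0
  let n := pi.length
  let counts := PySem.Dict.counter pi
  -- for v in range(n): if counts[pi[v]] == 1: inv = MASHCOMM(inv, v)   (pi[v] always in range here)
  let inv := (PySem.List.pyRange 0 n 1).foldl
    (fun inv v => if PySem.Dict.getD counts (PySem.List.pyGetD pi v 0) 0 == 1 then MASHCOMM inv v else inv) inv
  -- for v in sequence: inv = MASHCOMM(inv, pi[v])   (pi[v] may raise IndexError: Pre_ excludes that)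
  let inv := sequence.foldl (fun inv v => MASHCOMM inv (PySem.List.pyGetD pi v 0)) inv
  CLEANUP inv

-- ===== PORT B =====
def fuzz1Table : List Int := [0o37541, 0o61532, 0o5257, 0o26416]

-- v ^ FUZZ1_TABLE[v & 3]; the index is always in range, the default 0 never used
def fuzzB (x : Int) : Int := PySem.Int.bxor x (PySem.List.pyGetD fuzz1Table (PySem.Int.band x 3) 0)

-- B's outer while loop over the color-sorted vertex list: skip the run of vertices
-- sharing the head's color (the inner while); a run of length 1 (j == i + 1)
-- contributes its single vertex.
def runScan (pi : List Int) : List Int → Int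
  | [] => 0
  | v :: rest =>
      let run := rest.takeWhile (fun w => PySem.List.pyGetD pi w 0 == PySem.List.pyGetD pi v 0)
      (if run.length == 0 then fuzzB v else 0)
        + runScan pi (rest.dropWhile (fun w => PySem.List.pyGetD pi w 0 == PySem.List.pyGetD pi v 0))
  termination_by l => l.length
  decreasing_by
    simpa using Nat.lt_succ_of_le (List.length_dropWhile_le _ _)

def node_invariant_alt (G : List Int) (pi : List Int) (sequence : List Int) : Int :=
  let order := PySem.List.sorted (PySem.List.pyRange 0 pi.length 1)
      (fun v => PySem.List.pyGetD pi v 0) false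
  let inv := runScan pi order
  let inv := inv + (sequence.map (fun v => fuzzB (PySem.List.pyGetD pi v 0))).sum
  PySem.Int.mod inv 0x7FFF

-- ===== PRECONDITION & SPEC =====
-- Pre_ excludes exactly the inputs where A raises IndexError: an entry of `sequence`
-- that is not a valid (possibly negative) index into pi.
def Pre_node_invariant (G : List Int) (pi : List Int) (sequence : List Int) : Prop :=
  ∀ v ∈ sequence, PySem.Raise.InRange pi.length v
instance (G : List Int) (pi : List Int) (sequence : List Int) : Decidable (Pre_node_invariant G pi sequence) := by unfold Pre_node_invariant; infer_instance

def pvWitness_node_invariant : List Int × List Int × List Int := ([], [1, 2, 2], [0, -1])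

def Spec_node_invariant (G : List Int) (pi : List Int) (sequence : List Int) (out : Int) : Prop := out = node_invariant_alt G pi sequence
instance (G : List Int) (pi : List Int) (sequence : List Int) (out : Int) : Decidable (Spec_node_invariant G pi sequence out) := by unfold Spec_node_invariant; infer_instance

-- ===== CLAIM (what is proved, stated in full; the proofs are below) =====
def Claim_equal_node_invariant : Prop := ∀ (G : List Int) (pi : List Int) (sequence : List Int), Dom_node_invariant G pi sequence → Pre_node_invariant G pi sequence → Spec_node_invariant G pi sequence (node_invariant G pi sequence)

-- ===== LEMMAS AND PROOFS =====

-- proof-side copy of the run scan with an abstract key function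
def runScanK (k : Int → Int) : List Int → Int
  | [] => 0
  | v :: rest =>
      (if (rest.takeWhile (fun w => k w == k v)).length == 0 then fuzzB v else 0)
        + runScanK k (rest.dropWhile (fun w => k w == k v))
  termination_by l => l.length
  decreasing_by
    simpa using Nat.lt_succ_of_le (List.length_dropWhile_le _ _)

theorem runScan_eq_runScanK (pi : List Int) (l : List Int) :
    runScan pi l = runScanK (fun w => PySem.List.pyGetD pi w 0) l := by
  induction l using runScan.induct pi with
  | case1 => simp [runScan, runScanK]
  | case2 v rest ih => rw [runScan, runScanK, ih]

-- On a key-sorted list the run scan sums fuzzB over the elements whose key occurs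
-- exactly once among the list's keys.
theorem runScanK_eq (k : Int → Int) (l : List Int)
    (hp : l.Pairwise (fun a b => k a ≤ k b)) :
    runScanK k l
      = ((l.filter (fun v => ((l.map k).count (k v) == 1))).map fuzzB).sum := by
  induction l using runScanK.induct k with
  | case1 => simp [runScanK]
  | case2 v rest ih =>
    obtain ⟨hvle, hprest⟩ := List.pairwise_cons.mp hp
    rw [runScanK]
    set p : Int → Bool := fun w => k w == k v with hpdef
    set run := rest.takeWhile p with hrun
    set tail := rest.dropWhile p with htail
    have hsplit : rest = run ++ tail := (List.takeWhile_append_dropWhile).symm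
    have hruneq : ∀ w ∈ run, k w = k v := fun w hw => by
      simpa [hpdef] using List.mem_takeWhile_imp hw
    have hptl : tail.Pairwise (fun a b => k a ≤ k b) :=
      List.Pairwise.sublist (List.dropWhile_sublist p) hprest
    have htailgt : ∀ w ∈ tail, k v < k w := by
      cases htl : tail with
      | nil => simp
      | cons t0 ts =>
        intro w hw
        have ht0f : p t0 = false := by
          have h := List.head?_dropWhile_not p rest
          rw [← htail, htl] at h
          simpa using h
        have ht0ne : k t0 ≠ k v := by simpa [hpdef] using ht0f
        have ht0rest : t0 ∈ rest := by
          rw [hsplit, htl]; simp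
        have ht0gt : k v < k t0 := lt_of_le_of_ne (hvle t0 ht0rest) (Ne.symm ht0ne)
        rw [htl] at hptl
        rcases List.mem_cons.mp hw with h | h
        · rw [h]; exact ht0gt
        · have := (List.pairwise_cons.mp hptl).1 w h
          omega
    -- counts in the whole list v :: rest = v :: run ++ tail
    have hcount_c : ((v :: rest).map k).count (k v) = 1 + run.length := by
      rw [hsplit]
      simp only [List.map_cons, List.map_append, List.count_cons, List.count_append]
      have h1 : (run.map k).count (k v) = run.length := by
        rw [List.count_eq_length.mpr]
        · exact List.length_map ..
        · intro b hb
          rcases List.mem_map.mp hb with ⟨w, hw, rfl⟩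
          exact (hruneq w hw).symm
      have h2 : (tail.map k).count (k v) = 0 := by
        rw [List.count_eq_zero]
        intro hmem
        rcases List.mem_map.mp hmem with ⟨w, hw, hkw⟩
        have := htailgt w hw
        omega
      simp [h1, h2]
      omega
    have hcount_tail : ∀ w ∈ tail,
        ((v :: rest).map k).count (k w) = (tail.map k).count (k w) := by
      intro w hw
      have hgt := htailgt w hw
      rw [hsplit]
      simp only [List.map_cons, List.map_append, List.count_cons, List.count_append]
      have h1 : (run.map k).count (k w) = 0 := by
        rw [List.count_eq_zero]
        intro hmem
        rcases List.mem_map.mp hmem with ⟨u, hu, hku⟩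
        have := hruneq u hu
        omega
      have hne : (k v == k w) = false := by simp; omega
      simp [h1, hne]
    have hfc : tail.filter (fun w => ((v :: rest).map k).count (k w) == 1)
        = tail.filter (fun w => (tail.map k).count (k w) == 1) := by
      apply List.filter_congr
      intro w hw
      rw [hcount_tail w hw]
    have hrestc : (rest.map k).count (k v) = run.length := by
      have := hcount_c
      simp at this
      omega
    rw [List.filter_cons]
    by_cases hempty : run.length = 0
    · -- run empty: tail = rest, the head is a singleton cell
      have hrnil : run = [] := List.eq_nil_of_length_eq_zero hempty
      have htrest : tail = rest := by rw [hsplit, hrnil]; simp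
      rw [if_pos (by simp [hempty]), if_pos (by simp [hrestc, hempty])]
      rw [show rest.filter (fun w => ((v :: rest).map k).count (k w) == 1)
            = tail.filter (fun w => (tail.map k).count (k w) == 1) by rw [htrest] at hfc ⊢; exact hfc]
      rw [List.map_cons, List.sum_cons, ih hptl]
    · -- run nonempty: neither the head nor any run member is a singleton cell
      rw [if_neg (by simp [hempty]), if_neg (by have h := hrestc; simp; omega)]
      have hfr : run.filter (fun w => ((v :: rest).map k).count (k w) == 1) = [] := by
        rw [List.filter_eq_nil_iff]
        intro w hw
        rw [hruneq w hw]
        have h := hrestc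
        simp
        omega
      have hsplitf : run.filter (fun w => ((v :: rest).map k).count (k w) == 1)
            ++ tail.filter (fun w => ((v :: rest).map k).count (k w) == 1)
          = rest.filter (fun w => ((v :: rest).map k).count (k w) == 1) := by
        rw [← List.filter_append, ← hsplit]
      rw [← hsplitf, hfr, hfc, ih hptl]
      simp

-- ===== VERDICT (by name: the statement is the Claim_ definition above) =====
theorem node_invariant_spec : Claim_equal_node_invariant := by
  intro G pi sequence _ _
  unfold Spec_node_invariant node_invariant node_invariant_alt
  dsimp only []
  congr 1
  simp only [MASHCOMM]
  rw [PySem.List.foldl_add sequence (fun v => FUZZ1 (PySem.List.pyGetD pi v 0))]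
  have hfz : FUZZ1 = fuzzB := rfl
  rw [hfz]
  congr 1
  rw [PySem.List.foldl_if_eq_foldl_filter
        (fun v => PySem.Dict.getD (PySem.Dict.counter pi) (PySem.List.pyGetD pi v 0) 0 == 1)
        (fun inv v => inv + fuzzB v)]
  rw [PySem.List.foldl_add _ (fun v => fuzzB v), zero_add]
  set key := fun v : Int => PySem.List.pyGetD pi v 0 with hkey
  set rng := PySem.List.pyRange 0 (pi.length : Int) with hrng
  have hperm : (PySem.List.sorted rng key false).Perm rng := PySem.List.sorted_perm rng key false
  rw [runScan_eq_runScanK, runScanK_eq key _ (PySem.List.sorted_pairwise rng key)]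
  have hkeys : ((PySem.List.sorted rng key false).map key).Perm pi := by
    have := hperm.map key
    rwa [show rng.map key = pi from PySem.List.map_pyGetD_pyRange_zero pi 0] at this
  have hpred : ∀ v : Int,
      (((PySem.List.sorted rng key false).map key).count (key v) == 1)
        = (PySem.Dict.getD (PySem.Dict.counter pi) (key v) 0 == 1) := by
    intro v
    rw [PySem.Dict.getD_counter, hkeys.count_eq]
    simp
  have hfil : ((PySem.List.sorted rng key false).filter
        (fun v => ((PySem.List.sorted rng key false).map key).count (key v) == 1)).Perm
      (rng.filter (fun v => PySem.Dict.getD (PySem.Dict.counter pi) (key v) 0 == 1)) := by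
    rw [List.filter_congr (fun v _ => hpred v)]
    exact hperm.filter _
  exact ((hfil.map fuzzB).sum_eq).symm
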